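-- pv_equiv track=rewrite | github.com/zhangqianjin/nlp | nlp_one_hot.py | get_word_vec
-- ===== SOURCE A (Python) =====
-- def get_word_vec(segment_list, all_word_list):
--     word_vec_list = []
--     for word_list in segment_list:
--         temp_list = []
--         for word in all_word_list:
--             if word in word_list:
--                 temp_list.append(1)
--             else:
--                 temp_list.append(0)
--         word_vec_list.append(temp_list)
--     return word_vec_list
-- ===== SOURCE B (Python) =====
-- def get_word_vec(segment_list, all_word_list):
--     # inverted index: word -> all positions in the vocabulary
--     index = {}
--     for i, w in enumerate(all_word_list):
--         index.setdefault(w, []).append(i)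
--     n = len(all_word_list)
--     result = []
--     for word_list in segment_list:
--         vec = [0] * n
--         for word in word_list:
--             for i in index.get(word, []):
--                 vec[i] = 1
--         result.append(vec)
--     return result
-- ===== Notes on version B (the rewrite author's own statement) =====
-- stated objective: faster
-- what changed: Replaces the per-segment scan of the whole vocabulary with a list-membership test per entry by a precomputed inverted index (word -> posting list of vocabulary positions) and scatters each segment's words into a zero vector.
import Mathlib
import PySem

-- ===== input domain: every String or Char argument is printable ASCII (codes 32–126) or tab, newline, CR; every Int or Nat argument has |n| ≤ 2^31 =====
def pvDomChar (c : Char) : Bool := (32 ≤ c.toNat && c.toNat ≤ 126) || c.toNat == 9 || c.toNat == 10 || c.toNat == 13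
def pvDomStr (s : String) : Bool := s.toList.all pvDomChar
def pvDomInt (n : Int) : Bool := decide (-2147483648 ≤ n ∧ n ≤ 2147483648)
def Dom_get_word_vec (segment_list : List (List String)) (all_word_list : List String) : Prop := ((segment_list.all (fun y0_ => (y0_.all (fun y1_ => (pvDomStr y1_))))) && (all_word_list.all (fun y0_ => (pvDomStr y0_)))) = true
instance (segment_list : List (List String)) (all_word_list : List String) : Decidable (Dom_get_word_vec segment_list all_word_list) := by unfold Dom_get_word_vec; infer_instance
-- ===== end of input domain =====

-- B replaces A's per-segment scan of the vocabulary (with a list-membership test per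
-- vocabulary word) by a precomputed inverted index word -> posting list of vocabulary
-- positions, scattering each segment's words into a zero vector: faster.

-- ===== PORT A =====
def get_word_vec (segment_list : List (List String)) (all_word_list : List String) : List (List Int) :=
  segment_list.foldl (fun word_vec_list word_list =>
    word_vec_list ++
      [ all_word_list.foldl (fun temp_list word =>
          temp_list ++ [if word ∈ word_list then (1 : Int) else 0]) [] ]) []

-- ===== PORT B =====
-- index = {}; for i, w in enumerate(all_word_list): index.setdefault(w, []).append(i)
def gwvIndex (all_word_list : List String) : PySem.Dict String (List Int) :=
  (PySem.List.enumerate all_word_list).foldl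
    (fun d p => d.modify p.2 [] (· ++ [p.1])) PySem.Dict.empty

-- vec = [0]*n; for word in word_list: for i in index.get(word, []): vec[i] = 1
def gwvVec (idx : PySem.Dict String (List Int)) (n : Nat) (word_list : List String) : List Int :=
  word_list.foldl (fun vec word =>
    (idx.getD word []).foldl (fun vec i => PySem.List.pySetD vec i 1) vec)
    (List.replicate n 0)

def get_word_vec_alt (segment_list : List (List String)) (all_word_list : List String) : List (List Int) :=
  let idx := gwvIndex all_word_list
  segment_list.foldl (fun result word_list =>
    result ++ [gwvVec idx all_word_list.length word_list]) []

-- ===== PRECONDITION & SPEC =====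
def Spec_get_word_vec (segment_list : List (List String)) (all_word_list : List String) (out : List (List Int)) : Prop := out = get_word_vec_alt segment_list all_word_list
instance (segment_list : List (List String)) (all_word_list : List String) (out : List (List Int)) : Decidable (Spec_get_word_vec segment_list all_word_list out) := by unfold Spec_get_word_vec; infer_instance

-- ===== CLAIM (what is proved, stated in full; the proofs are below) =====
def Claim_equal_get_word_vec : Prop := ∀ (segment_list : List (List String)) (all_word_list : List String), Dom_get_word_vec segment_list all_word_list → Spec_get_word_vec segment_list all_word_list (get_word_vec segment_list all_word_list)

-- ===== LEMMAS AND PROOFS =====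

theorem gwv_foldl_app {α β : Type} (l : List α) (f : α → β) (acc : List β) :
    l.foldl (fun a x => a ++ [f x]) acc = acc ++ l.map f := by
  induction l generalizing acc with
  | nil => simp
  | cons x xs ih => simp [List.foldl_cons, ih]

theorem gwv_index_getD_fold (l : List (Int × String)) (d : PySem.Dict String (List Int))
    (c : String) :
    (l.foldl (fun d p => d.modify p.2 [] (· ++ [p.1])) d).getD c [] =
      d.getD c [] ++ (l.filter (fun p => p.2 == c)).map (·.1) := by
  induction l generalizing d with
  | nil => simp
  | cons p l ih =>
    rw [List.foldl_cons, ih, PySem.Dict.getD_modify]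
    by_cases h : c = p.2
    · simp [h]
    · have hne : p.2 ≠ c := fun h' => h h'.symm
      simp [h, hne]

theorem gwv_index_getD (all_word_list : List String) (w : String) :
    (gwvIndex all_word_list).getD w [] =
      ((PySem.List.enumerate all_word_list).filter (fun p => p.2 == w)).map (·.1) := by
  unfold gwvIndex
  rw [gwv_index_getD_fold]
  simp

theorem gwv_mem_index (all_word_list : List String) (w : String) (j : Nat) :
    ((j : Int) ∈ (gwvIndex all_word_list).getD w []) ↔
      ∃ h : j < all_word_list.length, all_word_list[j] = w := by
  rw [gwv_index_getD]
  simp only [List.mem_map, List.mem_filter, PySem.List.mem_enumerate_iff]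
  constructor
  · rintro ⟨p, ⟨⟨k, hk, rfl⟩, hw⟩, hj⟩
    simp only [zero_add] at hj hw
    have hkj : k = j := by exact_mod_cast hj
    subst hkj
    exact ⟨hk, by simpa using hw⟩
  · rintro ⟨h, rfl⟩
    exact ⟨(0 + (j : Int), all_word_list[j]), ⟨⟨j, h, rfl⟩, by simp⟩, by simp⟩

theorem gwv_index_nonneg (all_word_list : List String) (w : String) :
    ∀ i ∈ (gwvIndex all_word_list).getD w [], 0 ≤ i := by
  rw [gwv_index_getD]
  rintro i hi
  simp only [List.mem_map, List.mem_filter, PySem.List.mem_enumerate_iff] at hi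
  obtain ⟨p, ⟨⟨k, hk, rfl⟩, -⟩, rfl⟩ := hi
  simp

theorem gwv_scatter_length (ps : List Int) (v : List Int) :
    (ps.foldl (fun v i => PySem.List.pySetD v i 1) v).length = v.length := by
  induction ps generalizing v with
  | nil => rfl
  | cons i ps ih => simp [List.foldl_cons, ih, PySem.List.length_pySetD]

theorem gwv_scatter_getElem? (ps : List Int) (v : List Int) (j : Nat)
    (hnn : ∀ i ∈ ps, 0 ≤ i) :
    (ps.foldl (fun v i => PySem.List.pySetD v i 1) v)[j]? =
      if ((j : Int) ∈ ps ∧ j < v.length) then some 1 else v[j]? := by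
  induction ps generalizing v with
  | nil => simp
  | cons i ps ih =>
    have hi : 0 ≤ i := hnn i (by simp)
    rw [List.foldl_cons, ih _ (fun i h => hnn i (by simp [h]))]
    rw [PySem.List.pySetD_of_nonneg _ _ hi]
    by_cases hij : i = (j : Int)
    · subst hij
      simp only [Int.toNat_natCast] at *
      by_cases hjl : j < v.length
      · simp [hjl, List.mem_cons]
      · simp [hjl, List.mem_cons]
    · have hne : i.toNat ≠ j := by omega
      have hji : (j : Int) ≠ i := fun h => hij h.symm
      by_cases hm : (j : Int) ∈ ps
      · simp [hne, List.mem_cons, hm, hji]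
      · simp [hne, List.mem_cons, hm, hji]

theorem gwv_vecloop_getElem? (all_word_list : List String) (wl : List String)
    (v : List Int) (j : Nat) :
    (wl.foldl (fun vec word =>
        ((gwvIndex all_word_list).getD word []).foldl
          (fun vec i => PySem.List.pySetD vec i 1) vec) v)[j]? =
      if ((∃ w ∈ wl, (j : Int) ∈ (gwvIndex all_word_list).getD w []) ∧ j < v.length)
      then some 1 else v[j]? := by
  induction wl generalizing v with
  | nil => simp
  | cons w wl ih =>
    rw [List.foldl_cons, ih]
    rw [gwv_scatter_length, gwv_scatter_getElem? _ _ _ (gwv_index_nonneg all_word_list w)]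
    by_cases hw : (j : Int) ∈ (gwvIndex all_word_list).getD w []
    · by_cases hjl : j < v.length <;> simp [hw, hjl]
    · by_cases hm : ∃ x ∈ wl, (j : Int) ∈ (gwvIndex all_word_list).getD x []
      · by_cases hjl : j < v.length <;> simp [hw, hjl, hm]
      · by_cases hjl : j < v.length <;> simp [hw, hjl, hm]

theorem gwv_vec_eq_map (all_word_list : List String) (wl : List String) :
    gwvVec (gwvIndex all_word_list) all_word_list.length wl =
      all_word_list.map (fun w => if w ∈ wl then (1 : Int) else 0) := by
  unfold gwvVec
  apply List.ext_getElem?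
  intro j
  rw [gwv_vecloop_getElem?]
  simp only [List.length_replicate, List.getElem?_replicate, List.getElem?_map]
  by_cases hjl : j < all_word_list.length
  · have hiff : (∃ w ∈ wl, (j : Int) ∈ (gwvIndex all_word_list).getD w []) ↔
        all_word_list[j] ∈ wl := by
      constructor
      · rintro ⟨w, hwwl, hmem⟩
        obtain ⟨h1, hw⟩ := (gwv_mem_index all_word_list w j).mp hmem
        rwa [← hw] at hwwl
      · intro h
        exact ⟨all_word_list[j], h, (gwv_mem_index all_word_list _ j).mpr ⟨hjl, rfl⟩⟩
    by_cases hin : all_word_list[j] ∈ wl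
    · simp [hjl, hiff, hin]
    · simp [hjl, hiff, hin]
  · simp [hjl]

-- ===== VERDICT (by name: the statement is the Claim_ definition above) =====
theorem get_word_vec_spec : Claim_equal_get_word_vec := by
  intro segment_list all_word_list _
  unfold Spec_get_word_vec get_word_vec get_word_vec_alt
  rw [gwv_foldl_app, gwv_foldl_app]
  simp only [List.nil_append]
  apply List.map_congr_left
  intro wl _
  rw [gwv_vec_eq_map, gwv_foldl_app]
  simp
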